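/- GENERATED by mk_final_copies.py from the proof of the farm's unit `malloc` (farm:malloc.1: Proof.lean) as the
   re-elaboration sweep compiled it — do not edit. -/
import Vorbis.Spec.Units.malloc

open X86 X86.User Asan Vorbis

set_option maxRecDepth 4000
set_option maxHeartbeats 4000000

/-- `malloc(size)` satisfies its contract: `mov eax, 0 ; ret` (libc.c:48). No check site, no loop, no callee: one walk
from the entry to the `ret`, then the post (rax = 0: the 32-bit move zero-extends; no shadow byte written: memory is unchanged). -/
theorem Vorbis.Spec.Worked.malloc_ok : Vorbis.Spec.malloc.Statement := by
  intro Lay hLay μ hμ u₀ hcode others frames u ret he hpre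
  v_entry he
  -- 0x101780 `mov eax, 0` ; 0x101785 `ret` (libc.c:48): one walk to the `ret`
  u_walk hcode [hμ.vendor] span [Vorbis.L.textLo, Vorbis.L.textHi] side (v_side)
  -- the state after the `ret`: the contract's `Returned`
  refine ReachVia.done ?_
  v_returned
  refine ⟨?_, ?_⟩
  · -- rax = 0: the 32-bit constant 0, zero-extended (a closed fact)
    rw [w_rax]
    decide
  · -- no shadow byte is written: the memory is the entry state's
    v_untouched
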